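-- pv_equiv track=rewrite | github.com/redhaanggara21/python-image-processing | ExaustiveSearch.py | maxPackedSets
-- ===== SOURCE A (Python) =====
-- def maxPackedSets(items, sets):
--
-- 	# Initialize the maximum number of sets that can be packed to 0
-- 	maxSets = 0
--
-- 	# Loop through all the sets
-- 	for set in sets:
-- 		# Initialize the number of sets that can be packed to 0
-- 		numSets = 0
--
-- 		# Loop through all the items
-- 		for item in items:
-- 			# Check if the current item is in the current set
-- 			if item in set:
-- 				# If the item is in the set, increment
-- 				# the number of sets that can be packed
-- 				numSets += 1
--
-- 				# Remove the item from the set of items,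
-- 				# so that it is not counted again
-- 				items = [i for i in items if i != item]
--
-- 		# Update the maximum number of sets that can be packed
-- 		maxSets = max(maxSets, numSets)
--
-- 	return maxSets
-- ===== SOURCE B (Python) =====
-- def maxPackedSets(items, sets):
--     # Build a counter of available items once; for each set, sum and pop the
--     # counts of its distinct values (sequential consumption), track the best.
--     avail = {}
--     for i in items:
--         avail[i] = avail.get(i, 0) + 1
--     best = 0
--     for s in sets:
--         cnt = 0
--         for v in dict.fromkeys(s):
--             cnt += avail.pop(v, 0)
--         if cnt > best:
--             best = cnt
--     return best
-- ===== Notes on version B (the rewrite author's own statement) =====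
-- stated objective: faster
-- what changed: Replaces A's per-set rescan of the item list with repeated list re-filtering by a counter dict built once, each set consuming its distinct values by summing and popping their counts.
import Mathlib
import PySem

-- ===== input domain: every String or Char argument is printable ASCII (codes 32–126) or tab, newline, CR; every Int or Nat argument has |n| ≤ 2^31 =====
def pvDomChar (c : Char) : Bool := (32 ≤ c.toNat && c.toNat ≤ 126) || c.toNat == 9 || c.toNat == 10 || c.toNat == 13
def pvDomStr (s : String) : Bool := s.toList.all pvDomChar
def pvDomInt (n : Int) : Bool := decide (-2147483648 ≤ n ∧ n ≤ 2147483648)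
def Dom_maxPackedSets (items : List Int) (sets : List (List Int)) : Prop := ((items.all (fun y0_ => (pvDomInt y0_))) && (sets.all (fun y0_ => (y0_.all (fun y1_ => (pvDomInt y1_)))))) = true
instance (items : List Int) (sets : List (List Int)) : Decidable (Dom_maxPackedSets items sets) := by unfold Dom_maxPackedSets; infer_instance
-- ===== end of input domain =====

-- B replaces A's quadratic scan-and-refilter per set by one counter dict built once,
-- popping each set's distinct values (objective: faster, asymptotic).

-- ===== PORT A =====
-- Literal port of A: for each set, iterate over the snapshot of `items`,
-- counting members of the set and re-filtering the running `items` list.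
def maxPackedSets (items : List Int) (sets : List (List Int)) : Int :=
  (sets.foldl
    (fun (st : Int × List Int) s =>
      let inner := st.2.foldl
        (fun (t : Int × List Int) item =>
          if item ∈ s then (t.1 + 1, t.2.filter (fun i => i ≠ item)) else t)
        (0, st.2)
      (max st.1 inner.1, inner.2))
    (0, items)).1

-- ===== PORT B =====
-- Literal port of B: counter of items; per set, sum-and-pop its distinct values.
def maxPackedSets_alt (items : List Int) (sets : List (List Int)) : Int :=
  let avail := items.foldl (fun d i => d.insert i (d.getD i 0 + 1)) PySem.Dict.empty
  (sets.foldl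
    (fun (st : Int × PySem.Dict Int Int) s =>
      let t := (PySem.List.dedup s).foldl
        (fun (t : Int × PySem.Dict Int Int) v => (t.1 + t.2.getD v 0, t.2.erase v))
        (0, st.2)
      (if t.1 > st.1 then t.1 else st.1, t.2))
    (0, avail)).1

-- ===== PRECONDITION & SPEC =====
def Spec_maxPackedSets (items : List Int) (sets : List (List Int)) (out : Int) : Prop := out = maxPackedSets_alt items sets
instance (items : List Int) (sets : List (List Int)) (out : Int) : Decidable (Spec_maxPackedSets items sets out) := by unfold Spec_maxPackedSets; infer_instance

-- ===== CLAIM (what is proved, stated in full; the proofs are below) =====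
def Claim_equal_maxPackedSets : Prop := ∀ (items : List Int) (sets : List (List Int)), Dom_maxPackedSets items sets → Spec_maxPackedSets items sets (maxPackedSets items sets)

-- ===== LEMMAS AND PROOFS =====

theorem pv_find?_filter_erase (l : List (Int × Int)) (k k' : Int) :
    ((l.filter (fun p => !(p.1 == k))).find? (fun p => p.1 == k')).map (·.2)
    = if k' = k then none else (l.find? (fun p => p.1 == k')).map (·.2) := by
  induction l with
  | nil => split <;> simp
  | cons p rest ih =>
    by_cases hpk : p.1 = k
    · rw [show List.filter (fun p => !(p.1 == k)) (p :: rest)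
            = List.filter (fun p => !(p.1 == k)) rest from by simp [hpk], ih]
      by_cases hk : k' = k
      · simp [hk]
      · rw [if_neg hk, if_neg hk, List.find?_cons_of_neg (by simp [hpk]; omega)]
    · rw [show List.filter (fun p => !(p.1 == k)) (p :: rest)
            = p :: List.filter (fun p => !(p.1 == k)) rest from by simp [hpk]]
      by_cases hpk' : p.1 = k'
      · rw [List.find?_cons_of_pos (by simp [hpk']), if_neg (by omega),
          List.find?_cons_of_pos (by simp [hpk'])]
      · rw [List.find?_cons_of_neg (by simp [hpk']), ih]
        by_cases hk : k' = k
        · simp [hk]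
        · rw [if_neg hk, if_neg hk, List.find?_cons_of_neg (by simp [hpk'])]

theorem pv_get?_erase (d : PySem.Dict Int Int) (k k' : Int) :
    (d.erase k).get? k' = if k' = k then none else d.get? k' := by
  obtain ⟨l⟩ := d
  have := pv_find?_filter_erase l k k'
  simpa [PySem.Dict.erase, PySem.Dict.get?] using this

theorem pv_getD_erase (d : PySem.Dict Int Int) (k k' d0 : Int) :
    (d.erase k).getD k' d0 = if k' = k then d0 else d.getD k' d0 := by
  rw [PySem.Dict.getD_eq_get?_getD, PySem.Dict.getD_eq_get?_getD, pv_get?_erase]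
  split <;> simp

theorem pv_countP_cons_split (items : List Int) (v : Int) (L : List Int) :
    items.countP (fun i => decide (i ∈ v :: L))
      = items.countP (fun i => i == v)
        + items.countP (fun i => decide (i ∈ L) && !(i == v)) := by
  induction items with
  | nil => rfl
  | cons a itms ih =>
    simp only [List.countP_cons, ih]
    by_cases hav : a = v <;> by_cases haL : a ∈ L <;> simp [hav, haL] <;> omega

theorem pv_filter_cons_len (items : List Int) (v : Int) (L : List Int) :
    ((items.filter (fun i => decide (i ∈ v :: L))).length : Int)
      = (items.count v : Int)
        + (((items.filter (fun i => i ≠ v)).filter (fun i => decide (i ∈ L))).length : Int) := by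
  rw [List.filter_filter, ← List.countP_eq_length_filter, ← List.countP_eq_length_filter,
    List.count, pv_countP_cons_split]
  have : items.countP (fun i => decide (i ∈ L) && !(i == v))
      = items.countP (fun a => decide (a ∈ L) && decide (a ≠ v)) := by
    apply List.countP_congr
    intro x _
    by_cases hxv : x = v <;> by_cases hxL : x ∈ L <;> simp [hxv, hxL]
  rw [this]
  push_cast
  ring

theorem pv_filter_notmem_cons (items : List Int) (v : Int) (L : List Int) :
    items.filter (fun i => decide (i ∉ v :: L))
      = (items.filter (fun i => i ≠ v)).filter (fun i => decide (i ∉ L)) := by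
  rw [List.filter_filter]
  apply List.filter_congr
  intro x _
  by_cases hxv : x = v <;> by_cases hxL : x ∈ L <;> simp [hxv, hxL]

-- Inner loop of A: counts the snapshot's members of `s`, filters `cur` by non-membership.
theorem pv_innerA (xs s : List Int) (n : Int) (cur : List Int) :
    xs.foldl
      (fun (t : Int × List Int) item =>
        if item ∈ s then (t.1 + 1, t.2.filter (fun i => i ≠ item)) else t)
      (n, cur)
      = (n + ((xs.filter (fun i => decide (i ∈ s))).length : Int),
         cur.filter (fun i => decide (¬(i ∈ s ∧ i ∈ xs)))) := by
  induction xs generalizing n cur with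
  | nil => simp
  | cons x xs ih =>
    simp only [List.foldl_cons]
    by_cases hx : x ∈ s
    · rw [if_pos hx, ih]
      simp only [Prod.mk.injEq]
      constructor
      · simp only [List.filter_cons]
        rw [if_pos (by simpa using hx)]
        simp only [List.length_cons]
        push_cast
        omega
      · rw [List.filter_filter]
        apply List.filter_congr
        intro i _
        by_cases hiv : i = x
        · subst hiv; simp [hx]
        · by_cases his : i ∈ s <;> simp [hiv, his]
    · rw [if_neg hx, ih]
      simp only [Prod.mk.injEq]
      constructor
      · simp only [List.filter_cons]
        rw [if_neg (by simpa using hx)]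
      · apply List.filter_congr
        intro i _
        by_cases hiv : i = x
        · subst hiv; simp [hx]
        · simp [hiv]

-- Inner loop of B: under the counter invariant, sums the counts of the distinct
-- values and erases them, preserving the invariant for the filtered item list.
theorem pv_innerB (L : List Int) (hnd : L.Nodup) (c : Int) (d : PySem.Dict Int Int)
    (items : List Int) (hinv : ∀ v, d.getD v 0 = (items.count v : Int)) :
    (L.foldl (fun (t : Int × PySem.Dict Int Int) v => (t.1 + t.2.getD v 0, t.2.erase v)) (c, d)).1
        = c + ((items.filter (fun i => decide (i ∈ L))).length : Int)
    ∧ ∀ v, (L.foldl (fun (t : Int × PySem.Dict Int Int) v => (t.1 + t.2.getD v 0, t.2.erase v)) (c, d)).2.getD v 0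
        = ((items.filter (fun i => decide (i ∉ L))).count v : Int) := by
  induction L generalizing c d items with
  | nil => simpa using hinv
  | cons v L ih =>
    obtain ⟨hvL, hndL⟩ := List.nodup_cons.mp hnd
    simp only [List.foldl_cons]
    have hinv' : ∀ w, (d.erase v).getD w 0
        = (((items.filter (fun i => i ≠ v)).count w : Nat) : Int) := by
      intro w
      rw [pv_getD_erase]
      by_cases hwv : w = v
      · subst hwv
        rw [if_pos rfl, eq_comm, Nat.cast_eq_zero, List.count_eq_zero]
        simp
      · rw [if_neg hwv, hinv w]
        congr 1
        rw [List.count_filter (by simp [hwv])]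
    obtain ⟨h1, h2⟩ := ih hndL (c + d.getD v 0) (d.erase v) (items.filter (fun i => i ≠ v)) hinv'
    refine ⟨?_, ?_⟩
    · rw [h1, hinv v, pv_filter_cons_len]
      ring
    · intro w
      rw [h2 w, pv_filter_notmem_cons]

-- Outer loops agree under the counter invariant.
theorem pv_outer (sets : List (List Int)) (best : Int) (items : List Int)
    (d : PySem.Dict Int Int) (hinv : ∀ v, d.getD v 0 = (items.count v : Int)) :
    (sets.foldl
      (fun (st : Int × List Int) s =>
        let inner := st.2.foldl
          (fun (t : Int × List Int) item =>
            if item ∈ s then (t.1 + 1, t.2.filter (fun i => i ≠ item)) else t)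
          (0, st.2)
        (max st.1 inner.1, inner.2))
      (best, items)).1
    = (sets.foldl
      (fun (st : Int × PySem.Dict Int Int) s =>
        let t := (PySem.List.dedup s).foldl
          (fun (t : Int × PySem.Dict Int Int) v => (t.1 + t.2.getD v 0, t.2.erase v))
          (0, st.2)
        (if t.1 > st.1 then t.1 else st.1, t.2))
      (best, d)).1 := by
  induction sets generalizing best items d with
  | nil => rfl
  | cons s rest ih =>
    simp only [List.foldl_cons]
    rw [pv_innerA]
    obtain ⟨h1, h2⟩ := pv_innerB (PySem.List.dedup s) (PySem.List.nodup_dedup s) 0 d items hinv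
    rw [h1] at *
    have hmemA : items.filter (fun i => decide (¬(i ∈ s ∧ i ∈ items)))
        = items.filter (fun i => decide (i ∉ PySem.List.dedup s)) := by
      apply List.filter_congr
      intro i hi
      simp [hi]
    have hcntA : items.filter (fun i => decide (i ∈ s))
        = items.filter (fun i => decide (i ∈ PySem.List.dedup s)) := by
      apply List.filter_congr
      intro i _
      simp
    rw [hmemA, hcntA]
    rw [ih _ _ _ h2]
    have hmax : (max best (0 + ((items.filter (fun i => decide (i ∈ PySem.List.dedup s))).length : Int)))
        = (if (0 + ((items.filter (fun i => decide (i ∈ PySem.List.dedup s))).length : Int)) > best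
           then (0 + ((items.filter (fun i => decide (i ∈ PySem.List.dedup s))).length : Int)) else best) := by
      split_ifs with h
      · exact max_eq_right h.le
      · exact max_eq_left (not_lt.mp h)
    rw [hmax]

-- ===== VERDICT (by name: the statement is the Claim_ definition above) =====
theorem maxPackedSets_spec : Claim_equal_maxPackedSets := by
  intro items sets _
  unfold Spec_maxPackedSets maxPackedSets maxPackedSets_alt
  exact pv_outer sets 0 items _ (by
    intro v
    rw [PySem.Dict.foldl_insert_getD_add_one_eq_counter, PySem.Dict.getD_counter])
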